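/-
  CARRYING `DecodeResidue.Common` OVER A SEGMENT'S OWN STORES.

  Every one of the 11 segments of `decode_residue` holds the assertion `DecodeResidue.Common u₀ g v` (Vorbis/Spec/DecodeResidue.lean)
  at its entry and must hold it again after its own stores: the return address that every check call pushes at
  `[RA − 256, RA − 248)`, a callee's frame below the steady stack pointer, a spill into a scratch slot of the own frame, a store to
  `c_inter` / `p_inter`, a float store into a channel buffer. This file has the lemmas for that, once:

      CarryWin g d w                 a window that such a store may hit: a part of the stack `[RA − 848, RA − d)`, or a part of one of
                                     the decoder's channel buffers
      CarryWin.carry_apart           where a `CarryWin` lies: inside the contract's footprint, off `*f`, off the temp block, off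
                                     `[RA − d, RA)`
      Common.carry_slot              a read inside `[RA − d, RA)` is kept
      Common.carry_objEq             `*f` reads the same
      Common.carry_spill             COMMON after stores into `CarryWin g d` windows, `48 ≤ d`: the six saved registers are kept, the
                                     eight constant spill slots are GIVEN (the walker resolves them)
      Common.carry_wins              COMMON after stores into `CarryWin g 248` windows (below the steady stack pointer, or in a
                                     channel buffer): nothing is asked but the registers
      CarryGap g w                   a window that misses every constant slot: a `CarryWin g 240`, or a part of one of the four gaps
                                     between the constant spill slots (where the scratch slots are)
      Common.carry_const             a read inside a run of constant slots is kept by stores into `CarryGap` windows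
      Common.carry_scratch           COMMON after stores into `CarryGap` windows: nothing is asked but the registers
      CarryKept g m m'               what stores into the own stack frame keep: the footprint, the shadow, `*f`, the temp block, every
                                     allocated block
      CarryKept.of_stack / .of_scratch   `CarryKept` from `Mem.SameExcept` over windows of the stack / over `[RA − 256, RA − 152)`
      Common.carry_kept              COMMON from `CarryKept` and the frame facts
      Common.carry_fill / .carry_winv / .carry_winner    FILL, WA / WB and the i-loop invariant from `CarryKept`
      Common.moved / .moved_to       COMMON at a state with the SAME memory and other registers

  Conventions as in Vorbis/Spec/DecodeResidue.lean: RA = `g.RA` = the entry stack pointer; `rbp = RA − 8`, the steady `rsp = RA − 248`;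
  the protected frame (`c_inter`, `p_inter`) is `[RA − 152, RA − 56)`; the six saved registers are `[RA − 48, RA)`; the eight constant
  spill slots of `Common` lie in `[RA − 240, RA − 152)`.
-/
import Asan.CheckWalk
import Vorbis.Spec.DecodeResidue
namespace Vorbis.Spec
open X86 X86.User Asan

set_option maxRecDepth 4000
set_option maxHeartbeats 4000000

namespace DecodeResidue

/-! ### Windows: the stack below `RA − d`, the channel buffers -/

/-- **A window that a segment's store may hit without touching what `Common` reads**: a part of the own stack `[RA − 848, RA − d)`
(the return address of a check call, a callee's frame, a scratch slot, `c_inter` / `p_inter`: whatever lies below `RA − d`), or a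
part of one of the decoder's channel buffers (what `memset` zeroes, what `residue_decode` adds to). `d = 248` is "below the steady
stack pointer"; `d = 152` is "below the protected frame"; `d = 48` is "below the six saved registers". -/
def CarryWin (g : G) (d : Nat) (w : Span) : Prop :=
  (g.RA - 848 ≤ w.lo ∧ w.hi ≤ g.RA - d) ∨
  (∃ c : Nat, c < g.C ∧ stb_vorbis.channel_buffers g.e.mem g.f c ≤ w.lo ∧
    w.hi ≤ stb_vorbis.channel_buffers g.e.mem g.f c + 4 * bsize g.e.mem g.f 1)

/-- A window below `RA − d` is a window below `RA − d'` for every smaller `d'`. -/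
theorem CarryWin.carry_mono {g : G} {d d' : Nat} {w : Span} (hw : CarryWin g d w) (hd : d' ≤ d) : CarryWin g d' w := by
  rcases hw with ⟨h1, h2⟩ | hbuf
  · left
    constructor
    · exact h1
    · omega
  · right
    exact hbuf

/-- **What a `CarryWin` misses and where it lies**: inside a span of the contract's footprint; off `*f`; off the temp block;
off the part `[RA − d, RA)` of the own frame (`d ≤ 848`: the part is inside the function's own stack). -/
theorem CarryWin.carry_apart {u₀ : State} {g : G} {v : State} (he : Entered u₀ g) (c : Common u₀ g v) {d : Nat}
    (hd : d ≤ 848) {w : Span} (hw : CarryWin g d w) :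
    (∀ a : Nat, w.lo ≤ a → a < w.hi → ∃ w', w' ∈ g.spec.footprint g.e ∧ w'.lo ≤ a ∧ a < w'.hi) ∧
    (w.hi ≤ g.f ∨ g.f + 1808 ≤ w.lo) ∧
    (w.hi ≤ g.TB.base ∨ g.TB.base + g.TB.size ≤ w.lo) ∧
    (w.hi ≤ g.RA - d ∨ g.RA ≤ w.lo) := by
  have hpre := he.pre
  have hok := hpre.env.ok
  have hroom := he.room
  have hob : g.Blk (objBlock g.f) := hpre.vorbis.obj
  have hobst := hpre.free.offStack _ hob
  simp only [vblock, voff] at hobst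
  -- the temp block: inside the free part of the arena, off the stack
  have hbusy : ADOBusy g.A' g.others' v.mem g.f g.sz := c.point.busy
  have htr := hbusy.ok.tblock_range c.tblock
  have htoff := hbusy.ok.tblock_off c.tblock
  have h2 := hbusy.ok.AR2
  have hl8 := le_r8 g.TB.size
  unfold G.A' at htr h2
  simp only [varena] at htr h2
  have eR : (g.e.reg .rsp).toNat = g.RA := rfl
  have ef : (g.e.reg .rdi).toNat = g.f := rfl
  rcases hw with ⟨h1, h2'⟩ | ⟨k, hk, h1, h2'⟩
  · -- the stack below `RA − d`
    refine ⟨?_, ?_, ?_, ?_⟩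
    · intro a ha1 ha2
      refine ⟨⟨(g.e.reg .rsp).toNat - 848, (g.e.reg .rsp).toNat⟩, ?_, ?_, ?_⟩
      · unfold Spec.footprint
        exact List.mem_cons_self
      · show (g.e.reg .rsp).toNat - 848 ≤ a
        omega
      · show a < (g.e.reg .rsp).toNat
        omega
    · omega
    · omega
    · omega
  · -- a channel buffer
    have hk' : k < nchan g.e.mem g.f := hk
    have hkint : (k : Int) < stb_vorbis.channels g.e.mem g.f := by
      rw [nchan_def] at hk'
      omega
    have hC : SampleBuf g.Blk g.e.mem g.f ⟨stb_vorbis.channel_buffers g.e.mem g.f k, 4 * bsize g.e.mem g.f 1⟩ :=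
      SampleBuf.chan k hkint
    have hB : g.Blk ⟨stb_vorbis.channel_buffers g.e.mem g.f k, 4 * bsize g.e.mem g.f 1⟩ :=
      SampleBuf.blk he.vorbis.config hC
    have hst := hpre.free.offStack _ hB
    have hgap := hpre.free.offGap _ hB
    have hoffobj := hpre.sep.bufobj _ hC
    simp only [vblock, voff] at hoffobj
    simp only [] at hst hgap
    refine ⟨?_, ?_, ?_, ?_⟩
    · intro a ha1 ha2
      refine ⟨⟨stb_vorbis.channel_buffers g.e.mem g.f k,
        stb_vorbis.channel_buffers g.e.mem g.f k + 4 * bsize g.e.mem g.f 1⟩, ?_, ?_, ?_⟩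
      · unfold Spec.footprint
        apply List.mem_cons_of_mem
        show _ ∈ DecodeResidue.writes g.A g.e
        unfold DecodeResidue.writes
        apply List.mem_append_right
        exact List.mem_map.mpr ⟨k, List.mem_range.mpr hk', rfl⟩
      · show stb_vorbis.channel_buffers g.e.mem g.f k ≤ a
        omega
      · show a < stb_vorbis.channel_buffers g.e.mem g.f k + 4 * bsize g.e.mem g.f 1
        omega
    · omega
    · omega
    · omega

namespace Common

/-! ### COMMON over stores into `CarryWin` windows -/

/-- **A read inside the part `[RA − d, RA)` of the own frame** is kept by stores into `CarryWin g d` windows. With `d = 248`: the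
saved registers, the spill slots of `Common` and the extra slots of an `At<k>`; with `d = 152`: the protected frame and the
saved registers. -/
theorem carry_slot {u₀ : State} {g : G} {v : State} (he : Entered u₀ g) (c : Common u₀ g v) {d : Nat} (hd : d ≤ 848)
    {ws : List Span} {m : Mem} (hs : Mem.SameExcept ws v.mem m) (hws : ∀ w, w ∈ ws → CarryWin g d w) (a : Word) (n : Nat)
    (h1 : g.RA - d ≤ a.toNat) (h2 : a.toNat + n ≤ g.RA) : m.readLE a n = v.mem.readLE a n := by
  have hroom := he.room
  apply hs.readLE a n (by omega)
  intro w hw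
  have h := (CarryWin.carry_apart he c hd (hws w hw)).2.2.2
  omega

/-- **`*f` reads the same after stores into `CarryWin` windows**, on any list of windows below 1808. -/
theorem carry_objEq {u₀ : State} {g : G} {v : State} (he : Entered u₀ g) (c : Common u₀ g v) {d : Nat} (hd : d ≤ 848)
    {ws : List Span} {m : Mem} (hs : Mem.SameExcept ws v.mem m) (hws : ∀ w, w ∈ ws → CarryWin g d w) (wins : Wins)
    (hbelow : WinsBelow wins 1808) : ObjEq wins v.mem g.f m g.f := by
  have hob : g.Blk (objBlock g.f) := he.pre.vorbis.obj
  have hobin := he.pre.env.ok.inside _ hob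
  simp only [vblock, voff] at hobin
  apply ObjEq.of_sameExcept hs
  · intro w hw
    have := hbelow w hw
    omega
  · intro w hw s hsp
    have hb := hbelow w hw
    have h := (CarryWin.carry_apart he c hd (hws s hsp)).2.1
    omega

/-- **COMMON AFTER STORES INTO THE OWN STACK BELOW THE SAVED REGISTERS AND INTO CHANNEL BUFFERS.** `ws` is the walker's list of
windows (`u_same`), each a `CarryWin g d` with `48 ≤ d`: return addresses, callee frames, scratch slots, `c_inter` / `p_inter`,
parts of channel buffers. The six saved registers lie above the windows; `*f` and the row-pointer table of the temp block are not
met; no shadow byte was written (`hun`: the walker's `v_untouched`). The eight constant spill slots of `Common` may lie inside a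
window (`d < 248`), so they are GIVEN (the walker's `u_resolve` reads them); for `d = 248` use `carry_wins`. -/
theorem carry_spill {u₀ : State} {g : G} {v s : State} (he : Entered u₀ g) (c : Common u₀ g v) {d : Nat} (hd : 48 ≤ d)
    {ws : List Span} (hs : Mem.SameExcept ws v.mem s.mem) (hws : ∀ w, w ∈ ws → CarryWin g d w)
    (hun : ShadowUntouched v.mem s.mem)
    (rbp : s.reg .rbp = g.e.reg .rsp - 8) (rsp : s.reg .rsp = g.e.reg .rsp - 248)
    (code : CodeOK u₀ s.mem) (inv : abiInv s)
    (fr_f : UInt64.ofNat (s.mem.readLE (g.e.reg .rsp - 184) 8) = g.e.reg .rdi)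
    (fr_rb : UInt64.ofNat (s.mem.readLE (g.e.reg .rsp - 216) 8) = g.e.reg .rsi)
    (fr_ch : s.mem.readLE (g.e.reg .rsp - 156) 4 = g.ch)
    (fr_prd : s.mem.readLE (g.e.reg .rsp - 196) 4 = g.PRD)
    (fr_w : s.mem.readLE (g.e.reg .rsp - 200) 4 = g.W)
    (fr_rtype : s.mem.readLE (g.e.reg .rsp - 232) 4 = g.rtype)
    (fr_pcd : s.mem.readLE (g.e.reg .rsp - 176) 8 = g.TB.base)
    (fr_si : s.mem.readLE (g.e.reg .rsp - 240) 8 = (g.RA - 152) / 8) : Common u₀ g s := by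
  have hroom := he.room
  have eR : (g.e.reg .rsp).toNat = g.RA := rfl
  have hws48 : ∀ w, w ∈ ws → CarryWin g 48 w := fun w hw => (hws w hw).carry_mono hd
  have h48 : 48 ≤ 848 := by decide
  have hsl := carry_slot he c h48 hs hws48
  have hob : g.Blk (objBlock g.f) := he.pre.vorbis.obj
  have hobin := he.pre.env.ok.inside _ hob
  simp only [vblock, voff] at hobin
  apply Common.of_frame he rbp rsp code inv
  · rw [hsl _ 8 (by u_omega) (by u_omega)]
    exact c.s_rbp
  · rw [hsl _ 8 (by u_omega) (by u_omega)]
    exact c.s_r15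
  · rw [hsl _ 8 (by u_omega) (by u_omega)]
    exact c.s_r14
  · rw [hsl _ 8 (by u_omega) (by u_omega)]
    exact c.s_r13
  · rw [hsl _ 8 (by u_omega) (by u_omega)]
    exact c.s_r12
  · rw [hsl _ 8 (by u_omega) (by u_omega)]
    exact c.s_rbx
  · exact fr_f
  · exact fr_rb
  · exact fr_ch
  · exact fr_prd
  · exact fr_w
  · exact fr_rtype
  · exact fr_pcd
  · exact fr_si
  · -- the footprint
    exact c.same.step_same hs (fun w hw => (CarryWin.carry_apart he c h48 (hws48 w hw)).1)
  · -- the shadow layer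
    exact c.shadow.untouched hun
  · -- `Bits`: `*f` is not met
    exact c.point.vorbis.bits.frame (carry_objEq he c h48 hs hws48 objWins (by decide))
  · -- `ADOBusy`
    have hb : ADOBusy g.A' g.others' v.mem g.f g.sz := c.point.busy
    exact hb.transfer (carry_objEq he c h48 hs hws48 ADO.wins (by decide))
  · -- TB: the row-pointer table is not met
    apply c.tb.frame
    have hsz := c.tb.size
    have h3 : g.C * (8 + 8 * g.PRD) = g.C * 8 + g.C * (8 * g.PRD) := Nat.mul_add _ _ _
    have hbusy : ADOBusy g.A' g.others' v.mem g.f g.sz := c.point.busy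
    have htoff := hbusy.ok.tblock_off c.tblock
    apply Block.Kept.of_sameExcept hs
    · intro w hw
      have h := (CarryWin.carry_apart he c h48 (hws48 w hw)).2.2.1
      show g.TB.base + 8 * g.C ≤ w.lo ∨ w.hi ≤ g.TB.base
      omega
    · show g.TB.base + 8 * g.C ≤ 2 ^ 64
      omega
  · -- μ
    rw [mu_transfer (carry_objEq he c h48 hs hws48 muWins (by decide))]
    exact c.mu_le

/-- **COMMON AFTER STORES BELOW THE STEADY STACK POINTER AND INTO CHANNEL BUFFERS** (`CarryWin g 248`: the return address of a
check call at `[RA − 256, RA − 248)`, a callee's frame, the zeroed or decoded part of a channel buffer): every frame slot of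
`Common` lies above the stack windows and off the buffers, so nothing is asked but the two frame registers, the code and the ABI
invariant. For the extra slots of an `At<k>` use `carry_slot` with the same `hs`, `hws`. -/
theorem carry_wins {u₀ : State} {g : G} {v s : State} (he : Entered u₀ g) (c : Common u₀ g v) {ws : List Span}
    (hs : Mem.SameExcept ws v.mem s.mem) (hws : ∀ w, w ∈ ws → CarryWin g 248 w)
    (hun : ShadowUntouched v.mem s.mem)
    (rbp : s.reg .rbp = g.e.reg .rsp - 8) (rsp : s.reg .rsp = g.e.reg .rsp - 248)
    (code : CodeOK u₀ s.mem) (inv : abiInv s) : Common u₀ g s := by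
  have hroom := he.room
  have eR : (g.e.reg .rsp).toNat = g.RA := rfl
  have hsl := carry_slot he c (by decide : 248 ≤ 848) hs hws
  apply carry_spill he c (by decide : 48 ≤ 248) hs hws hun rbp rsp code inv
  · rw [hsl _ 8 (by u_omega) (by u_omega)]
    exact c.fr_f
  · rw [hsl _ 8 (by u_omega) (by u_omega)]
    exact c.fr_rb
  · rw [hsl _ 4 (by u_omega) (by u_omega)]
    exact c.fr_ch
  · rw [hsl _ 4 (by u_omega) (by u_omega)]
    exact c.fr_prd
  · rw [hsl _ 4 (by u_omega) (by u_omega)]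
    exact c.fr_w
  · rw [hsl _ 4 (by u_omega) (by u_omega)]
    exact c.fr_rtype
  · rw [hsl _ 8 (by u_omega) (by u_omega)]
    exact c.fr_pcd
  · rw [hsl _ 8 (by u_omega) (by u_omega)]
    exact c.fr_si

end Common

/-! ### Stores that miss every constant slot: nothing is asked -/

/-- **A window that misses every slot `Common` reads**: a `CarryWin g 240` (the stack below the lowest constant slot
`[rbp − 0xe8]`, so also the scratch slot `[RA − 248, RA − 240)`; or a part of a channel buffer), or a part of one of the four
gaps between the constant spill slots: `[RA − 228, RA − 216)`, `[RA − 208, RA − 200)`, `[RA − 192, RA − 184)`,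
`[RA − 168, RA − 156)` (the scratch slots `[rbp−0xdc] [rbp−0xd8] [rbp−0xc8] [rbp−0xb8] [rbp−0xa0] [rbp−0x98]`). -/
def CarryGap (g : G) (w : Span) : Prop :=
  CarryWin g 240 w ∨
  (g.RA - 228 ≤ w.lo ∧ w.hi ≤ g.RA - 216) ∨
  (g.RA - 208 ≤ w.lo ∧ w.hi ≤ g.RA - 200) ∨
  (g.RA - 192 ≤ w.lo ∧ w.hi ≤ g.RA - 184) ∨
  (g.RA - 168 ≤ w.lo ∧ w.hi ≤ g.RA - 156)

/-- A `CarryGap` lies below the protected frame (or in a channel buffer). -/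
theorem CarryGap.carry_gap {g : G} {w : Span} (hw : CarryGap g w) : CarryWin g 152 w := by
  rcases hw with hcw | hgap
  · exact hcw.carry_mono (by decide)
  · left
    omega

namespace Common

/-- **A read inside one of the five runs of constant slots** — `[RA − 240, RA − 228)`, `[RA − 216, RA − 208)`,
`[RA − 200, RA − 192)`, `[RA − 184, RA − 168)`, `[RA − 156, RA)` (the last one with the protected frame and the saved registers) —
is kept by stores into `CarryGap` windows. `lo`, `hi` name the run (`hreg` is `by decide`). -/
theorem carry_const {u₀ : State} {g : G} {v : State} (he : Entered u₀ g) (c : Common u₀ g v) {ws : List Span} {m : Mem}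
    (hs : Mem.SameExcept ws v.mem m) (hws : ∀ w, w ∈ ws → CarryGap g w) (a : Word) (n lo hi : Nat)
    (hreg : (lo = 240 ∧ hi = 228) ∨ (lo = 216 ∧ hi = 208) ∨ (lo = 200 ∧ hi = 192) ∨ (lo = 184 ∧ hi = 168) ∨
      (lo = 156 ∧ hi = 0))
    (h1 : g.RA - lo ≤ a.toNat) (h2 : a.toNat + n ≤ g.RA - hi) : m.readLE a n = v.mem.readLE a n := by
  have hroom := he.room
  have h240 : 240 ≤ 848 := by decide
  apply hs.readLE a n (by omega)
  intro w hw
  rcases hws w hw with hcw | hgap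
  · have h := (CarryWin.carry_apart he c h240 hcw).2.2.2
    omega
  · omega

/-- **COMMON AFTER STORES THAT MISS EVERY CONSTANT SLOT** (`CarryGap`: return addresses, callee frames, the scratch slots
between the constant slots, parts of channel buffers): nothing is asked but the two frame registers, the code and the ABI
invariant. For the extra slots of an `At<k>` that lie in a run of constant slots use `carry_const`. -/
theorem carry_scratch {u₀ : State} {g : G} {v s : State} (he : Entered u₀ g) (c : Common u₀ g v) {ws : List Span}
    (hs : Mem.SameExcept ws v.mem s.mem) (hws : ∀ w, w ∈ ws → CarryGap g w)
    (hun : ShadowUntouched v.mem s.mem)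
    (rbp : s.reg .rbp = g.e.reg .rsp - 8) (rsp : s.reg .rsp = g.e.reg .rsp - 248)
    (code : CodeOK u₀ s.mem) (inv : abiInv s) : Common u₀ g s := by
  have hroom := he.room
  have eR : (g.e.reg .rsp).toNat = g.RA := rfl
  have hsl := carry_const he c hs hws
  have hws152 : ∀ w, w ∈ ws → CarryWin g 152 w := fun w hw => (hws w hw).carry_gap
  apply carry_spill he c (by decide : 48 ≤ 152) hs hws152 hun rbp rsp code inv
  · rw [hsl _ 8 184 168 (by decide) (by u_omega) (by u_omega)]
    exact c.fr_f
  · rw [hsl _ 8 216 208 (by decide) (by u_omega) (by u_omega)]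
    exact c.fr_rb
  · rw [hsl _ 4 156 0 (by decide) (by u_omega) (by u_omega)]
    exact c.fr_ch
  · rw [hsl _ 4 200 192 (by decide) (by u_omega) (by u_omega)]
    exact c.fr_prd
  · rw [hsl _ 4 200 192 (by decide) (by u_omega) (by u_omega)]
    exact c.fr_w
  · rw [hsl _ 4 240 228 (by decide) (by u_omega) (by u_omega)]
    exact c.fr_rtype
  · rw [hsl _ 8 184 168 (by decide) (by u_omega) (by u_omega)]
    exact c.fr_pcd
  · rw [hsl _ 8 240 228 (by decide) (by u_omega) (by u_omega)]
    exact c.fr_si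

end Common

/-! ### Stores into the own stack frame only: what they keep -/

/-- **What a memory `m'` that differs from a cut point's memory `m` inside the own stack frame only keeps**: the footprint, the
shadow, `*f`, the temp block and every allocated block (so every block the residue record reads: `classdata`, its rows). The
content invariants (FILL, WA / WB, the i-loop invariant) are carried from this: `Common.carry_fill`, `.carry_winv`,
`.carry_winner`. -/
structure CarryKept (g : G) (m m' : Mem) : Prop where
  /-- the footprint of the contract -/
  foot : Mem.SameExcept (g.spec.footprint g.e) g.e.mem m'
  /-- no shadow byte was written -/
  shadowKept : ShadowUntouched m m'
  /-- the decoder object reads the same -/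
  objSame : (objBlock g.f).Same m m'
  /-- the temp block reads the same -/
  tbKept : g.TB.Kept m m'
  /-- every allocated block reads the same -/
  blkKept : AllKept g.Blk m m'

/-- **A batch of stores into the own 848 bytes of stack** (`ws`: the walker's windows, each inside `[RA − 848, RA)`) keeps the
footprint, the shadow, `*f`, the temp block and every allocated block: they all lie off the stack region. -/
theorem CarryKept.of_stack {u₀ : State} {g : G} {v : State} {m' : Mem} (he : Entered u₀ g) (c : Common u₀ g v)
    {ws : List Span} (hst : Mem.SameExcept ws v.mem m')
    (hws : ∀ w, w ∈ ws → g.RA - 848 ≤ w.lo ∧ w.hi ≤ g.RA) : CarryKept g v.mem m' := by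
  have hroom := he.room
  have eR : (g.e.reg .rsp).toNat = g.RA := rfl
  have hobst := he.pre.free.offStack _ he.vorbis.obj
  simp only [vblock, voff] at hobst
  have htb := c.point.busy.ok.tblock_off c.tblock
  refine ⟨?_, ?_, ?_, ?_, ?_⟩
  · -- the windows lie inside the frame's 848 bytes
    apply c.same.step_same hst
    intro w hw a h1 h2
    have hb := hws w hw
    refine ⟨⟨(g.e.reg .rsp).toNat - 848, (g.e.reg .rsp).toNat⟩, ?_, ?_, ?_⟩
    · unfold Spec.footprint
      exact List.mem_cons_self ..
    · show (g.e.reg .rsp).toNat - 848 ≤ a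
      omega
    · show a < (g.e.reg .rsp).toNat
      omega
  · -- the shadow region is far above the stack
    apply hst.eqOn
    intro w hw
    have hb := hws w hw
    omega
  · -- `*f` is an allocated block: off the stack
    apply Block.Same.of_sameExcept hst
    intro w hw
    have hb := hws w hw
    simp only [vblock, voff]
    omega
  · -- the temp block lies in the arena: off the stack
    apply Block.Kept.of_sameExcept hst
    · intro w hw
      have hb := hws w hw
      omega
    · omega
  · -- an allocated block is off the stack
    apply AllKept.of_sameExcept he.pre.env.ok hst
    intro B hB w hw
    have hb := hws w hw
    have hoff := he.pre.free.offStack B hB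
    omega

/-- **A batch of stores into the scratch window `[RA − 256, RA − 152)`** (the spill slots below the protected frame and the
return-address slot of a check call: where every store of a control segment lies): `CarryKept.of_stack` for the one window. -/
theorem CarryKept.of_scratch {u₀ : State} {g : G} {v : State} {m' : Mem} (he : Entered u₀ g) (c : Common u₀ g v)
    (hst : Mem.SameExcept [⟨(g.e.reg .rsp).toNat - 256, (g.e.reg .rsp).toNat - 152⟩] v.mem m') : CarryKept g v.mem m' := by
  have hroom := he.room
  have eR : (g.e.reg .rsp).toNat = g.RA := rfl
  apply CarryKept.of_stack he c hst
  intro w hw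
  have e1 : w = ⟨(g.e.reg .rsp).toNat - 256, (g.e.reg .rsp).toNat - 152⟩ := List.mem_singleton.mp hw
  subst e1
  simp only []
  omega

namespace Common

/-- **COMMON FROM `CarryKept` AND THE FRAME FACTS**: at the exit of a segment that only stored into the own stack frame the frame
facts are given (the walker's `u_resolve`), everything else follows from `Common` of the segment's entry and `CarryKept`. -/
theorem carry_kept {u₀ : State} {g : G} {v v' : State} (he : Entered u₀ g) (c : Common u₀ g v)
    (hk : CarryKept g v.mem v'.mem)
    (rbp : v'.reg .rbp = g.e.reg .rsp - 8) (rsp : v'.reg .rsp = g.e.reg .rsp - 248)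
    (code : CodeOK u₀ v'.mem) (inv : abiInv v')
    (s_rbp : UInt64.ofNat (v'.mem.readLE (g.e.reg .rsp - 8) 8) = g.e.reg .rbp)
    (s_r15 : UInt64.ofNat (v'.mem.readLE (g.e.reg .rsp - 16) 8) = g.e.reg .r15)
    (s_r14 : UInt64.ofNat (v'.mem.readLE (g.e.reg .rsp - 24) 8) = g.e.reg .r14)
    (s_r13 : UInt64.ofNat (v'.mem.readLE (g.e.reg .rsp - 32) 8) = g.e.reg .r13)
    (s_r12 : UInt64.ofNat (v'.mem.readLE (g.e.reg .rsp - 40) 8) = g.e.reg .r12)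
    (s_rbx : UInt64.ofNat (v'.mem.readLE (g.e.reg .rsp - 48) 8) = g.e.reg .rbx)
    (fr_f : UInt64.ofNat (v'.mem.readLE (g.e.reg .rsp - 184) 8) = g.e.reg .rdi)
    (fr_rb : UInt64.ofNat (v'.mem.readLE (g.e.reg .rsp - 216) 8) = g.e.reg .rsi)
    (fr_ch : v'.mem.readLE (g.e.reg .rsp - 156) 4 = g.ch)
    (fr_prd : v'.mem.readLE (g.e.reg .rsp - 196) 4 = g.PRD)
    (fr_w : v'.mem.readLE (g.e.reg .rsp - 200) 4 = g.W)
    (fr_rtype : v'.mem.readLE (g.e.reg .rsp - 232) 4 = g.rtype)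
    (fr_pcd : v'.mem.readLE (g.e.reg .rsp - 176) 8 = g.TB.base)
    (fr_si : v'.mem.readLE (g.e.reg .rsp - 240) 8 = (g.RA - 152) / 8) : Common u₀ g v' := by
  have hbits : Bits g.Blk g.len v.mem g.f := c.point.vorbis.bits
  have hobr := hbits.OBR
  simp only [voff] at hobr
  apply Common.of_frame he rbp rsp code inv s_rbp s_r15 s_r14 s_r13 s_r12 s_rbx fr_f fr_rb fr_ch fr_prd fr_w fr_rtype
    fr_pcd fr_si hk.foot
  · -- the shadow layer
    exact c.shadow.untouched hk.shadowKept
  · -- `Bits`: the fields of `*f` read the same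
    exact hbits.frame_fields (Bits.SameFields.of_same hk.objSame)
  · -- the arena fields read the same
    apply c.point.busy.transfer
    exact ObjEq.of_same hk.objSame (by simp only [voff]; omega) (by decide)
  · -- the row-pointer table
    apply c.tb.frame
    apply hk.tbKept.mono
    · show g.TB.base ≤ g.TB.base
      omega
    · show g.TB.base + 8 * g.C ≤ g.TB.base + g.TB.size
      have := c.tb.size
      have h3 : g.C * (8 + 8 * g.PRD) = g.C * 8 + g.C * (8 * g.PRD) := Nat.mul_add _ _ _
      omega
  · -- μ reads `*f` only
    rw [mu_frame_obj (by omega) hk.objSame]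
    exact c.mu_le

/-- **The residue record reads in the new memory as in the old one**: both read as at the entry (`Common.reads`,
`Entered.reads` over the footprint). -/
theorem carry_reads {u₀ : State} {g : G} {v : State} {m' : Mem} (he : Entered u₀ g) (c : Common u₀ g v)
    (hk : CarryKept g v.mem m') : ResidueReads v.mem g.f m' g.f g.r := by
  have r1 := c.reads
  have r2 := (he.reads hk.foot).1
  constructor
  · rw [r2.begin, r1.begin]
  · rw [r2.end_, r1.end_]
  · rw [r2.part_size, r1.part_size]
  · rw [r2.classifications, r1.classifications]
  · rw [r2.classbook, r1.classbook]
  · rw [r2.classdata, r1.classdata]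
  · rw [r2.residue_books, r1.residue_books]
  · rw [r2.codebook_count, r1.codebook_count]
  · rw [r2.cbk, r1.cbk]
  · rw [r2.E, r1.E]
  · rw [r2.W, r1.W]

/-- **FILL(j, m) carried over stores into the own stack frame**: the temp block, the record, the class book's header and the
`classdata` table all lie off the stack. In the form `WInv.frame` / `WInnerInv.frame` ask for (`hfill`), for any row predicate
whose rows are rows of the temp block (`rows := g.rowsA` with `0 < g.C`, `rows := g.rowsB` with `j < ch ≤ C`). -/
theorem carry_fill {u₀ : State} {g : G} {v : State} {m' : Mem} (he : Entered u₀ g) (c : Common u₀ g v)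
    (hk : CarryKept g v.mem m') {rows : Nat → Prop} (hrows : ∀ j, rows j → j < g.C) :
    ∀ j m, rows j → Fill v.mem g.f g.r g.TB g.C g.PRD j m → m ≤ g.PRD → Fill m' g.f g.r g.TB g.C g.PRD j m := by
  intro j m hj hf hm
  have hrd := carry_reads he c hk
  have hcd := hk.blkKept _ (c.resAt he).R8a
  exact hf.frame (hrows j hj) hm c.tb.size hk.tbKept hrd hcd

/-- **WA / WB (the invariant of a `while (pcount < part_read)`) carried over stores into the own stack frame.** -/
theorem carry_winv {u₀ : State} {g : G} {v : State} {m' : Mem} (he : Entered u₀ g) (c : Common u₀ g v)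
    (hk : CarryKept g v.mem m') {rows : Nat → Prop} (hrows : ∀ j, rows j → j < g.C) {pass cs pcount : Nat}
    (h : WInv v.mem g.f g.r g.TB g.C g.PRD g.W rows pass cs pcount) :
    WInv m' g.f g.r g.TB g.C g.PRD g.W rows pass cs pcount :=
  h.frame (fun _ hj => hj) (carry_fill he c hk hrows) (c.w_pos he)

/-- **The invariant of an i-loop carried over stores into the own stack frame.** -/
theorem carry_winner {u₀ : State} {g : G} {v : State} {m' : Mem} (he : Entered u₀ g) (c : Common u₀ g v)
    (hk : CarryKept g v.mem m') {rows : Nat → Prop} (hrows : ∀ j, rows j → j < g.C) {pass cs i pcount : Nat}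
    (h : WInnerInv v.mem g.f g.r g.TB g.C g.PRD g.W rows pass cs i pcount) :
    WInnerInv m' g.f g.r g.TB g.C g.PRD g.W rows pass cs i pcount :=
  h.frame (fun _ hj => hj) (carry_fill he c hk hrows) (c.w_pos he)

/-! ### The same memory, other registers -/

/-- **COMMON at a state that differs from `v` in registers other than rbp / rsp only** (a trampoline's `mov r15d, [slot]` and
`jmp`; a compare and a branch): same memory, same frame registers, the ABI invariant. -/
theorem moved {u₀ : State} {g : G} {v s : State} (c : Common u₀ g v) (hm : s.mem = v.mem)
    (hbp : s.reg .rbp = v.reg .rbp) (hsp : s.reg .rsp = v.reg .rsp) (hinv : abiInv s) : Common u₀ g s where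
  rbp := hbp.trans c.rbp
  rsp := hsp.trans c.rsp
  code := by
    rw [hm]
    exact c.code
  inv := hinv
  s_rbp := by
    rw [hm]
    exact c.s_rbp
  s_r15 := by
    rw [hm]
    exact c.s_r15
  s_r14 := by
    rw [hm]
    exact c.s_r14
  s_r13 := by
    rw [hm]
    exact c.s_r13
  s_r12 := by
    rw [hm]
    exact c.s_r12
  s_rbx := by
    rw [hm]
    exact c.s_rbx
  fr_f := by
    rw [hm]
    exact c.fr_f
  fr_rb := by
    rw [hm]
    exact c.fr_rb
  fr_ch := by
    rw [hm]
    exact c.fr_ch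
  fr_prd := by
    rw [hm]
    exact c.fr_prd
  fr_w := by
    rw [hm]
    exact c.fr_w
  fr_rtype := by
    rw [hm]
    exact c.fr_rtype
  fr_pcd := by
    rw [hm]
    exact c.fr_pcd
  fr_si := by
    rw [hm]
    exact c.fr_si
  same := by
    rw [hm]
    exact c.same
  shadow := by
    rw [hm]
    exact c.shadow
  point := by
    rw [hm]
    exact c.point
  sep := by
    rw [hm]
    exact c.sep
  tb := by
    rw [hm]
    exact c.tb
  obj := by
    rw [hm]
    exact c.obj
  reads := by
    rw [hm]
    exact c.reads
  dnd_same := by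
    rw [hm]
    exact c.dnd_same
  rb_same := by
    rw [hm]
    exact c.rb_same
  mu_le := by
    rw [hm]
    exact c.mu_le

/-- **`moved` with the frame registers as the walker states them** (`rbp = RA − 8`, `rsp = RA − 248`: the form of
`Common.of_frame`): a path of a segment that stores nothing. -/
theorem moved_to {u₀ : State} {g : G} {v s : State} (c : Common u₀ g v) (hm : s.mem = v.mem)
    (rbp : s.reg .rbp = g.e.reg .rsp - 8) (rsp : s.reg .rsp = g.e.reg .rsp - 248) (inv : abiInv s) : Common u₀ g s :=
  c.moved hm (rbp.trans c.rbp.symm) (rsp.trans c.rsp.symm) inv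

end Common

/-! ### The call of codebook_decode_deinterleave_repeat (0x10f18e in segment .4, 0x10f538 in segment .6): its footprint lies inside ours

The callee's footprint `deint.wins s` (Vorbis/Spec/Codebook.lean) has a window `[outputs[k], outputs[k] + 4·len)` only for the
NON-NULL pointers of the table (CONTRACTS 55; a do_not_decode channel has `residue_buffers[k] = NULL` by P2 and contributes
nothing). So every window of the callee lies inside a window of decode_residue's own footprint, and `Common.same` is
re-established after the call by `Entered.same_through_deint` in one line. `s` is the state at the callee's FIRST instruction (the
walker's `s_10f18e` / `s_10f538`): `rsp = RA − 272` (the steady `RA − 248`, the two pushed arguments, the return address),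
`[rsp + 8] = len = n` at `RA − 264`, `[rsp + 16] = total_decode` at `RA − 256`. -/

/-- **A non-NULL pointer of `residue_buffers` is one of the decoder's channel buffers**, in any memory `m` that differs from the entry
memory inside the footprint only: the table reads as at the entry (`Entered.reads`), a do_not_decode channel has a NULL pointer
(`Args.null`), a decoded channel has `channel_buffers[c]` of the ENTRY memory for a `c < channels` (`Args.buf`). -/
theorem Entered.deint_out_chan {u₀ : State} {g : G} (he : Entered u₀ g) {m : Mem}
    (hsame : Mem.SameExcept (g.spec.footprint g.e) g.e.mem m) {k : Nat} (hk : k < g.ch) (hne : m.ptr (g.rb + 8 * k) ≠ 0) :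
    ∃ c : Nat, c < nchan g.e.mem g.f ∧ m.ptr (g.rb + 8 * k) = stb_vorbis.channel_buffers g.e.mem g.f c := by
  have hrb := (he.reads hsame).2.2 k hk
  have hargs := he.args
  by_cases hd : DND g.e.mem g.dnd k
  · exact absurd (hrb.trans (hargs.null k hk hd)) hne
  · obtain ⟨c, hc, hptr, _⟩ := hargs.buf k hk hd
    have h1 := he.vorbis.header.HD1
    refine ⟨c, ?_, hrb.trans hptr⟩
    rw [nchan_def]
    omega

/-- **A channel buffer of the entry memory is a window of decode_residue's footprint** (the `List.range … map` part of
`DecodeResidue.writes`). -/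
theorem G.chan_mem_footprint {g : G} {c : Nat} (hc : c < nchan g.e.mem g.f) :
    (⟨stb_vorbis.channel_buffers g.e.mem g.f c, stb_vorbis.channel_buffers g.e.mem g.f c + 4 * bsize g.e.mem g.f 1⟩ : Span) ∈
      g.spec.footprint g.e := by
  unfold Spec.footprint
  apply List.mem_cons_of_mem
  show _ ∈ DecodeResidue.writes g.A g.e
  unfold DecodeResidue.writes
  apply List.mem_append_right
  exact List.mem_map.mpr ⟨c, List.mem_range.mpr hc, rfl⟩

/-- **Every window of the callee's footprint `deint.wins s` lies inside a window of decode_residue's footprint** — the side goal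
`hsub` of `Vorbis.Spec.Reader.sameExcept_through_callee`. `s`: the state at the callee's first instruction, its argument registers
named by the ghosts (`rdi = f`, `rdx = residue_buffers`, `ecx = ch`, `r8 = &c_inter`, `r9 = &p_inter`, `[rsp + 8] = n`).
`bookWins f` lies in the five windows of `*f`; the two ints and the argument slot `[RA − 256, RA − 252)` lie in the stack window
`[RA − 848, RA)`; a non-NULL output window `[residue_buffers[k], · + 4·n)` lies in the channel buffer
`[channel_buffers[c], · + 4·blocksize_1)` (`Entered.deint_out_chan`, `Args.n_le`: `2·n ≤ blocksize_1`). -/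
theorem Entered.deint_wins_inside {u₀ : State} {g : G} (he : Entered u₀ g) {s : State}
    (hsame : Mem.SameExcept (g.spec.footprint g.e) g.e.mem s.mem)
    (hrsp : (s.reg .rsp).toNat = g.RA - 272) (hrdi : (s.reg .rdi).toNat = g.f) (hrdx : (s.reg .rdx).toNat = g.rb)
    (hrcx : argU32 (s.reg .rcx) = g.ch) (hr8 : (s.reg .r8).toNat = g.ci) (hr9 : (s.reg .r9).toNat = g.pi)
    (hlen : s.mem.u32 (g.RA - 264) = g.n) :
    ∀ w ∈ deint.wins s, InSpans (g.spec.footprint g.e) w.lo (w.hi - w.lo) := by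
  intro w hw
  have hroom := he.room
  have e8 : (s.reg .rsp).toNat + 8 = g.RA - 264 := by omega
  -- the stack window of our footprint
  have hstack : (⟨g.RA - 848, g.RA⟩ : Span) ∈ g.spec.footprint g.e := by
    unfold Spec.footprint
    exact List.mem_cons_self ..
  -- a window of `*f` of our footprint, by its position in `DecodeResidue.writes`
  have hobj : ∀ x : Span, x ∈ [(⟨g.f + 48, g.f + 56⟩ : Span), ⟨g.f + 84, g.f + 96⟩, ⟨g.f + 132, g.f + 144⟩,
      ⟨g.f + 1484, g.f + 1749⟩, ⟨g.f + 1752, g.f + 1784⟩] → x ∈ g.spec.footprint g.e := by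
    intro x hx
    unfold Spec.footprint
    apply List.mem_cons_of_mem
    show _ ∈ DecodeResidue.writes g.A g.e
    unfold DecodeResidue.writes
    apply List.mem_append_left
    simp only [List.mem_cons, List.not_mem_nil, or_false] at hx ⊢
    rcases hx with h | h | h | h | h
    · exact Or.inl h
    · exact Or.inr (Or.inl h)
    · exact Or.inr (Or.inr (Or.inl h))
    · exact Or.inr (Or.inr (Or.inr (Or.inl h)))
    · exact Or.inr (Or.inr (Or.inr (Or.inr (Or.inl h))))
  rcases deint.wins_cases hw with hb | h8 | h9 | hslot | ⟨k, hk, hnz, hwin⟩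
  · -- the reader's windows of `*f`
    rw [hrdi] at hb
    unfold bookWins at hb
    simp only [List.mem_cons, List.not_mem_nil, or_false] at hb
    rcases hb with h | h | h | h | h
    · refine ⟨⟨g.f + 48, g.f + 56⟩, hobj _ (by simp only [List.mem_cons, true_or]), ?_, ?_⟩
      · rw [h]
        exact Nat.le_refl _
      · rw [h]
        simp only []
        omega
    · refine ⟨⟨g.f + 84, g.f + 96⟩, hobj _ (by simp only [List.mem_cons, true_or, or_true]), ?_, ?_⟩
      · rw [h]
        exact Nat.le_refl _
      · rw [h]
        simp only []
        omega
    · refine ⟨⟨g.f + 132, g.f + 144⟩, hobj _ (by simp only [List.mem_cons, true_or, or_true]), ?_, ?_⟩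
      · rw [h]
        simp only []
        omega
      · rw [h]
        simp only []
        omega
    · refine ⟨⟨g.f + 1484, g.f + 1749⟩, hobj _ (by simp only [List.mem_cons, true_or, or_true]), ?_, ?_⟩
      · rw [h]
        exact Nat.le_refl _
      · rw [h]
        simp only []
        omega
    · refine ⟨⟨g.f + 1752, g.f + 1784⟩, hobj _ (by simp only [List.mem_cons, true_or, or_true]), ?_, ?_⟩
      · rw [h]
        exact Nat.le_refl _
      · rw [h]
        simp only []
        omega
  · -- `*c_inter_p`: `[RA − 104, RA − 100)`
    refine ⟨⟨g.RA - 848, g.RA⟩, hstack, ?_, ?_⟩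
    · rw [h8, hr8]
      simp only [G.ci]
      omega
    · rw [h8, hr8]
      simp only [G.ci]
      omega
  · -- `*p_inter_p`: `[RA − 88, RA − 84)`
    refine ⟨⟨g.RA - 848, g.RA⟩, hstack, ?_, ?_⟩
    · rw [h9, hr9]
      simp only [G.pi]
      omega
    · rw [h9, hr9]
      simp only [G.pi]
      omega
  · -- the argument slot `total_decode`: `[RA − 256, RA − 252)`
    refine ⟨⟨g.RA - 848, g.RA⟩, hstack, ?_, ?_⟩
    · rw [hslot, hrsp]
      simp only []
      omega
    · rw [hslot, hrsp]
      simp only []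
      omega
  · -- a non-NULL output window: inside a channel buffer
    rw [hrcx] at hk
    rw [hrdx] at hnz hwin
    rw [e8, hlen] at hwin
    obtain ⟨c, hc, hptr⟩ := he.deint_out_chan hsame hk hnz
    have hn := he.args.n_le
    refine ⟨_, G.chan_mem_footprint hc, ?_, ?_⟩
    · rw [hwin, hptr]
      exact Nat.le_refl _
    · rw [hwin, hptr]
      simp only []
      omega

/-- **`Common.same` AFTER THE CALL of codebook_decode_deinterleave_repeat, in one line.** `hsame`: the footprint up to the callee's
first instruction `s` (`Common.same` of the last cut, composed with the segment's own stack stores); `hcall`: the walker's `w_same`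
of the call — the callee's stack window `⟨lo, hi⟩` (`[rsp − 496, rsp)` of `s`, however the walker spells it: any window inside
`[RA − 848, RA)`: `hlo`, `hle`, `hhi` by `u_omega`) and `deint.wins s`; the result: the footprint up to the state after the return, `m = s_<addr>r.mem`. -/
theorem Entered.same_through_deint {u₀ : State} {g : G} (he : Entered u₀ g) {s : State} {m : Mem} {lo hi : Nat}
    (hsame : Mem.SameExcept (g.spec.footprint g.e) g.e.mem s.mem)
    (hrsp : (s.reg .rsp).toNat = g.RA - 272) (hrdi : (s.reg .rdi).toNat = g.f) (hrdx : (s.reg .rdx).toNat = g.rb)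
    (hrcx : argU32 (s.reg .rcx) = g.ch) (hr8 : (s.reg .r8).toNat = g.ci) (hr9 : (s.reg .r9).toNat = g.pi)
    (hlen : s.mem.u32 (g.RA - 264) = g.n) (hlo : g.RA - 848 ≤ lo) (hle : lo ≤ hi) (hhi : hi ≤ g.RA)
    (hcall : Mem.SameExcept (⟨lo, hi⟩ :: deint.wins s) s.mem m) :
    Mem.SameExcept (g.spec.footprint g.e) g.e.mem m := by
  apply Vorbis.Spec.Reader.sameExcept_through_callee hsame hcall
  intro w hw
  rcases List.mem_cons.mp hw with hw0 | hw1
  · refine ⟨⟨g.RA - 848, g.RA⟩, ?_, ?_, ?_⟩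
    · unfold Spec.footprint
      exact List.mem_cons_self ..
    · rw [hw0]
      exact hlo
    · rw [hw0]
      simp only []
      omega
  · exact he.deint_wins_inside hsame hrsp hrdi hrdx hrcx hr8 hr9 hlen w hw1

end DecodeResidue

end Vorbis.Spec
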